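-- pv_equiv track=rewrite | github.com/JeongGod/Algo-study | JeongGod/3week/programmers/68646.py | solution
-- ===== SOURCE A (Python) =====
-- def solution(a):
--     """
--     1. 하나를 기준으로 왼쪽, 오른쪽중 가장 작은 놈을 찾는다.
--     2. 왼쪽 작은 놈, 오른쪽 작은 놈 둘 다 작으면 불가능이다.
--     """
--     answer = 0
--     left_min = []
--     right_min = []
--     left_min_val = a[0]
--     right_min_val = a[-1]
--     for val in a:
--         if left_min_val > val:
--             left_min_val = val
--         left_min.append(left_min_val)
--
--     for val in a[::-1]:
--         if right_min_val > val:
--             right_min_val = val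
--         right_min.append(right_min_val)
--     right_min = right_min[::-1]
--
--     for idx in range(len(a)):
--         if idx == 0 or idx == len(a) - 1:
--             answer += 1
--             continue
--         if a[idx] > right_min[idx+1] and a[idx] > left_min[idx-1]:
--             continue
--         answer += 1
--     return answer
-- ===== SOURCE B (Python) =====
-- def solution(a):
--     # direct per-index check: i survives iff no strictly smaller element
--     # exists before i, or none exists after i
--     n = len(a)
--     answer = 0
--     for i in range(n):
--         if all(a[j] >= a[i] for j in range(i)) or all(a[j] >= a[i] for j in range(i + 1, n)):
--             answer += 1
--     return answer
-- ===== Notes on version B (the rewrite author's own statement) =====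
-- stated objective: simpler
-- what changed: Replaces A's three staged passes (building explicit prefix-min and suffix-min arrays, then an indexed AND-test pass) by one direct brute-force check per index: i survives iff no strictly smaller element occurs before i or none occurs after i; no auxiliary arrays at all, at the cost of quadratic time.
import Mathlib
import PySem

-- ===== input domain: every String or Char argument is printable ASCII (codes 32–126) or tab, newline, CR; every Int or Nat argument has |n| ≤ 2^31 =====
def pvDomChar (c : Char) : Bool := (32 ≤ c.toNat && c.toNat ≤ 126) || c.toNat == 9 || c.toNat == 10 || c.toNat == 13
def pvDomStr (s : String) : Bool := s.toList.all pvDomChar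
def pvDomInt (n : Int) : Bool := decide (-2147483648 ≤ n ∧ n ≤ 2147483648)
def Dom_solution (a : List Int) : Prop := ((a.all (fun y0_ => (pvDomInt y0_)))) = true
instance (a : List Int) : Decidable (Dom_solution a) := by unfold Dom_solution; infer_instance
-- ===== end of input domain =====

-- B drops A's prefix-min/suffix-min arrays and the third AND-test pass entirely: it checks each
-- index directly against the elements before and after it (simpler, no auxiliary arrays, O(n^2)).

-- ===== PORT A =====
-- loop body of A's two min-array building loops: track the running min, append it
def stepMinA (s : Int × List Int) (val : Int) : Int × List Int :=
  let m := if s.1 > val then val else s.1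
  (m, m :: s.2)

def solution (a : List Int) : Int :=
  let leftInit := PySem.List.pyGetD a 0 0            -- a[0] (in range under Pre_)
  let rightInit := PySem.List.pyGetD a (-1) 0        -- a[-1]
  let left_min := (a.foldl stepMinA (leftInit, [])).2.reverse
  let arev := (PySem.List.slice? a none none (-1)).getD []    -- a[::-1]
  let right_min0 := (arev.foldl stepMinA (rightInit, [])).2.reverse
  let right_min := (PySem.List.slice? right_min0 none none (-1)).getD []  -- right_min[::-1]
  (PySem.List.pyRange 0 (a.length : Int) 1).foldl (fun answer idx =>
    if idx = 0 ∨ idx = (a.length : Int) - 1 then answer + 1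
    else if PySem.List.pyGetD a idx 0 > PySem.List.pyGetD right_min (idx + 1) 0 ∧
            PySem.List.pyGetD a idx 0 > PySem.List.pyGetD left_min (idx - 1) 0 then answer
    else answer + 1) 0

-- ===== PORT B =====
def solution_alt (a : List Int) : Int :=
  let n : Int := (a.length : Int)
  (PySem.List.pyRange 0 n 1).foldl (fun answer i =>
    if (PySem.List.pyRange 0 i 1).all
         (fun j => decide (PySem.List.pyGetD a j 0 ≥ PySem.List.pyGetD a i 0))
       || (PySem.List.pyRange (i + 1) n 1).all
         (fun j => decide (PySem.List.pyGetD a j 0 ≥ PySem.List.pyGetD a i 0))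
    then answer + 1 else answer) 0

-- ===== PRECONDITION & SPEC =====
-- Pre_ excludes only the empty list, on which A raises IndexError (a[0]).
def Pre_solution (a : List Int) : Prop := a ≠ []
instance (a : List Int) : Decidable (Pre_solution a) := by unfold Pre_solution; infer_instance
def pvWitness_solution : List Int := [3, 1, 2]

def Spec_solution (a : List Int) (out : Int) : Prop := out = solution_alt a
instance (a : List Int) (out : Int) : Decidable (Spec_solution a out) := by unfold Spec_solution; infer_instance

-- ===== CLAIM (what is proved, stated in full; the proofs are below) =====
def Claim_equal_solution : Prop := ∀ (a : List Int), Dom_solution a → Pre_solution a → Spec_solution a (solution a)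

-- ===== LEMMAS AND PROOFS =====

-- reference form of A's running-min loops
def rmins (m : Int) : List Int → List Int
  | [] => []
  | v :: t => (if m > v then v else m) :: rmins (if m > v then v else m) t

lemma foldA_snd (a : List Int) (m : Int) (acc : List Int) :
    (a.foldl stepMinA (m, acc)).2 = (rmins m a).reverse ++ acc := by
  induction a generalizing m acc with
  | nil => simp [rmins]
  | cons v t ih => simp [stepMinA, rmins, ih]

lemma rmins_length (m : Int) (a : List Int) : (rmins m a).length = a.length := by
  induction a generalizing m with
  | nil => rfl
  | cons v t ih => simp [rmins, ih]

lemma rmins_getElem (a : List Int) (m : Int) (i : Nat) (h : i < a.length) :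
    (rmins m a)[i]'(by rw [rmins_length]; exact h) = (a.take (i + 1)).foldl min m := by
  induction a generalizing m i with
  | nil => simp at h
  | cons v t ih =>
    cases i with
    | zero => simp [rmins, min_def]; split <;> split <;> omega
    | succ j =>
      have : (if m > v then v else m) = min m v := by simp [min_def]; split <;> split <;> omega
      simp only [rmins, List.getElem_cons_succ, List.take_succ_cons, List.foldl_cons, this]
      exact ih _ _ (by simpa using h)

lemma foldl_if3 (l : List Int) (P Q : Int → Prop) [DecidablePred P] [DecidablePred Q] (init : Int) :
    l.foldl (fun answer idx => if P idx then answer + 1 else if Q idx then answer else answer + 1) init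
      = init + (l.map (fun idx => if P idx then 1 else if Q idx then (0:Int) else 1)).sum := by
  have hf : (fun (answer idx : Int) => if P idx then answer + 1 else if Q idx then answer else answer + 1)
       = fun answer idx => answer + (if P idx then 1 else if Q idx then (0:Int) else 1) := by
    funext ans idx; split_ifs <;> ring
  rw [hf, PySem.List.foldl_add]

lemma foldl_if2 (l : List Int) (P : Int → Prop) [DecidablePred P] (init : Int) :
    l.foldl (fun answer idx => if P idx then answer + 1 else answer) init
      = init + (l.map (fun idx => if P idx then (1:Int) else 0)).sum := by
  have hf : (fun (answer idx : Int) => if P idx then answer + 1 else answer)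
       = fun answer idx => answer + (if P idx then (1:Int) else 0) := by
    funext ans idx; split_ifs <;> ring
  rw [hf, PySem.List.foldl_add]

-- x ≤ foldl min ↔ x below the seed and every element
lemma le_foldl_min (x m : Int) (l : List Int) :
    x ≤ l.foldl min m ↔ x ≤ m ∧ ∀ y ∈ l, x ≤ y := by
  induction l generalizing m with
  | nil => simp
  | cons v t ih =>
    simp only [List.foldl_cons, ih, List.mem_cons, le_min_iff]
    constructor
    · rintro ⟨⟨h1, h2⟩, h3⟩; exact ⟨h1, fun y hy => by rcases hy with rfl | hy; exact h2; exact h3 y hy⟩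
    · rintro ⟨h1, h2⟩; exact ⟨⟨h1, h2 v (Or.inl rfl)⟩, fun y hy => h2 y (Or.inr hy)⟩

-- B's left-side all over range(i) ↔ every earlier element is ≥ a[i]
lemma all_left_iff (a : List Int) (i : Nat) (hi : i < a.length) :
    ((PySem.List.pyRange 0 (i : Int) 1).all
       (fun j => decide (PySem.List.pyGetD a j 0 ≥ a[i]'hi)) = true)
      ↔ ∀ k : Nat, (hk : k < i) → a[i]'hi ≤ a[k]'(by omega) := by
  rw [List.all_eq_true]
  constructor
  · intro h k hk
    have := h (k : Int) (by rw [PySem.List.mem_pyRange_one]; omega)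
    simp only [decide_eq_true_eq, ge_iff_le] at this
    rwa [PySem.List.pyGetD_natCast, List.getD_eq_getElem a 0 (by omega)] at this
  · intro h j hj
    rw [PySem.List.mem_pyRange_one] at hj
    have hjn : j = ((j.toNat : Nat) : Int) := by omega
    rw [hjn, PySem.List.pyGetD_natCast, List.getD_eq_getElem a 0 (by omega)]
    simp only [decide_eq_true_eq, ge_iff_le]
    exact h j.toNat (by omega)

-- B's right-side all over range(i+1, n) ↔ every later element is ≥ a[i]
lemma all_right_iff (a : List Int) (i : Nat) (hi : i < a.length) :
    ((PySem.List.pyRange ((i : Int) + 1) (a.length : Int) 1).all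
       (fun j => decide (PySem.List.pyGetD a j 0 ≥ a[i]'hi)) = true)
      ↔ ∀ k : Nat, i < k → (hk : k < a.length) → a[i]'hi ≤ a[k]'hk := by
  rw [List.all_eq_true]
  constructor
  · intro h k hik hk
    have := h (k : Int) (by rw [PySem.List.mem_pyRange_one]; omega)
    simp only [decide_eq_true_eq, ge_iff_le] at this
    rwa [PySem.List.pyGetD_natCast, List.getD_eq_getElem a 0 hk] at this
  · intro h j hj
    rw [PySem.List.mem_pyRange_one] at hj
    have hjn : j = ((j.toNat : Nat) : Int) := by omega
    rw [hjn, PySem.List.pyGetD_natCast, List.getD_eq_getElem a 0 (by omega)]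
    simp only [decide_eq_true_eq, ge_iff_le]
    exact h j.toNat (by omega) (by omega)

lemma solution_eq_alt (a : List Int) (h : a ≠ []) : solution a = solution_alt a := by
  have hn : 0 < a.length := List.length_pos_iff.mpr h
  unfold solution solution_alt
  simp only [PySem.List.slice?_none_none_neg_one, Option.getD_some, foldA_snd,
    List.append_nil, List.reverse_reverse]
  rw [foldl_if3 _ (fun idx => idx = 0 ∨ idx = (a.length:Int) - 1)
      (fun idx => PySem.List.pyGetD a idx 0 > PySem.List.pyGetD (rmins (PySem.List.pyGetD a (-1) 0) a.reverse).reverse (idx + 1) 0 ∧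
                  PySem.List.pyGetD a idx 0 > PySem.List.pyGetD (rmins (PySem.List.pyGetD a 0 0) a) (idx - 1) 0) 0,
      foldl_if2 _ (fun i =>
        ((PySem.List.pyRange 0 i 1).all
           (fun j => decide (PySem.List.pyGetD a j 0 ≥ PySem.List.pyGetD a i 0))
         || (PySem.List.pyRange (i + 1) (a.length : Int) 1).all
           (fun j => decide (PySem.List.pyGetD a j 0 ≥ PySem.List.pyGetD a i 0))) = true) 0,
      zero_add, zero_add]
  refine congrArg List.sum ?_
  apply List.ext_getElem
  · simp
  intro i hi1 hi2
  have hia : i < a.length := by simpa [PySem.List.length_pyRange_one] using hi1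
  simp only [List.getElem_map, PySem.List.getElem_pyRange_one, zero_add]
  have hL0 : PySem.List.pyGetD a 0 0 = a[0]'hn := by
    rw [PySem.List.pyGetD_zero]; exact List.getD_eq_getElem a 0 hn
  have hR0 : PySem.List.pyGetD a (-1) 0 = a[a.length - 1]'(by omega) := by
    rw [PySem.List.pyGetD_neg_one a 0 h]; exact List.getLast_eq_getElem h
  by_cases h0 : (i : Int) = 0
  · have hi0 : i = 0 := by omega
    subst hi0
    rw [if_pos (Or.inl h0)]
    have : (PySem.List.pyRange 0 (0:Int) 1) = [] := PySem.List.pyRange_one_eq_nil (by omega)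
    simp [this]
  by_cases hlast : (i : Int) = (a.length : Int) - 1
  · rw [if_pos (Or.inr hlast)]
    have : (PySem.List.pyRange ((i:Int) + 1) (a.length : Int) 1) = [] :=
      PySem.List.pyRange_one_eq_nil (by omega)
    simp [this]
  -- middle index: 1 ≤ i ≤ a.length - 2
  rw [if_neg (by exact fun hc => hc.elim h0 hlast)]
  have hai : PySem.List.pyGetD a (↑i) 0 = a[i]'hia := by
    rw [PySem.List.pyGetD_natCast]; exact List.getD_eq_getElem a 0 hia
  have hrl : a.reverse.length = a.length := List.length_reverse
  have hrmlen : (rmins (PySem.List.pyGetD a (-1) 0) a.reverse).length = a.length := by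
    rw [rmins_length, hrl]
  have hRM : PySem.List.pyGetD (rmins (PySem.List.pyGetD a (-1) 0) a.reverse).reverse ((i:Int) + 1) 0
      = List.foldl min (PySem.List.pyGetD a (-1) 0) (List.take (a.length - 1 - i) a.reverse) := by
    have hc : ((i:Int) + 1) = ((i + 1 : Nat) : Int) := by push_cast; ring
    rw [hc, PySem.List.pyGetD_natCast,
        List.getD_eq_getElem _ 0 (n := i+1) (by rw [List.length_reverse, hrmlen]; omega)]
    rw [List.getElem_reverse]
    simp only [hrmlen]
    rw [rmins_getElem a.reverse _ (a.length - 1 - (i+1)) (by rw [hrl]; omega)]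
    have hidx : a.length - 1 - (i+1) + 1 = a.length - 1 - i := by omega
    rw [hidx]
  have hLM : PySem.List.pyGetD (rmins (PySem.List.pyGetD a 0 0) a) ((i:Int) - 1) 0
      = List.foldl min (PySem.List.pyGetD a 0 0) (List.take i a) := by
    have hc : ((i:Int) - 1) = ((i - 1 : Nat) : Int) := by omega
    rw [hc, PySem.List.pyGetD_natCast,
        List.getD_eq_getElem _ 0 (n := i-1) (by rw [rmins_length]; omega)]
    rw [rmins_getElem a _ (i-1) (by omega)]
    have hidx : i - 1 + 1 = i := by omega
    rw [hidx]
  rw [hRM, hLM, hai]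
  -- reduce both sides to the two "every element on that side is ≥ a[i]" propositions
  have hleft : a[i]'hia ≤ List.foldl min (PySem.List.pyGetD a 0 0) (List.take i a)
      ↔ ∀ k : Nat, (hk : k < i) → a[i]'hia ≤ a[k]'(by omega) := by
    rw [le_foldl_min, hL0]
    constructor
    · intro ⟨h1, h2⟩ k hk
      rcases Nat.eq_zero_or_pos k with rfl | hkpos
      · exact h1
      · exact h2 _ (by
          rw [List.mem_take_iff_getElem]
          exact ⟨k, by omega, rfl⟩)
    · intro hk
      refine ⟨hk 0 (by omega), fun y hy => ?_⟩
      rw [List.mem_take_iff_getElem] at hy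
      obtain ⟨j, hj, rfl⟩ := hy
      exact hk j (by omega)
  have hright : a[i]'hia ≤ List.foldl min (PySem.List.pyGetD a (-1) 0) (List.take (a.length - 1 - i) a.reverse)
      ↔ ∀ k : Nat, i < k → (hk : k < a.length) → a[i]'hia ≤ a[k]'hk := by
    rw [le_foldl_min, hR0]
    constructor
    · intro ⟨h1, h2⟩ k hik hk
      rcases Nat.lt_or_ge k (a.length - 1) with hklt | hkge
      · refine h2 _ ?_
        rw [List.mem_take_iff_getElem]
        refine ⟨a.length - 1 - k, by simp [hrl]; omega, ?_⟩
        rw [List.getElem_reverse]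
        congr 1; omega
      · have : k = a.length - 1 := by omega
        subst this; exact h1
    · intro hk
      refine ⟨hk (a.length - 1) (by omega) (by omega), fun y hy => ?_⟩
      rw [List.mem_take_iff_getElem] at hy
      obtain ⟨j, hj, rfl⟩ := hy
      rw [List.getElem_reverse]
      exact hk _ (by simp [hrl] at hj; omega) (by omega)
  by_cases hcl : ∀ k : Nat, (hk : k < i) → a[i]'hia ≤ a[k]'(by omega)
  · rw [if_neg (by rw [not_and_or]; right; rw [not_lt]; exact hleft.mpr hcl),
        if_pos (by rw [Bool.or_eq_true]; left; exact (all_left_iff a i hia).mpr hcl)]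
  · by_cases hcr : ∀ k : Nat, i < k → (hk : k < a.length) → a[i]'hia ≤ a[k]'hk
    · rw [if_neg (by rw [not_and_or]; left; rw [not_lt]; exact hright.mpr hcr),
          if_pos (by rw [Bool.or_eq_true]; right; exact (all_right_iff a i hia).mpr hcr)]
    · rw [if_pos ⟨by rw [gt_iff_lt, lt_iff_not_ge]; exact fun hc => hcr (hright.mp hc),
                  by rw [gt_iff_lt, lt_iff_not_ge]; exact fun hc => hcl (hleft.mp hc)⟩,
          if_neg (by
            rw [Bool.or_eq_true]
            rintro (hc | hc)
            · exact hcl ((all_left_iff a i hia).mp hc)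
            · exact hcr ((all_right_iff a i hia).mp hc))]

-- ===== VERDICT (by name: the statement is the Claim_ definition above) =====
theorem solution_spec : Claim_equal_solution := by
  intro a _ hp
  unfold Spec_solution
  exact solution_eq_alt a hp
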